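-- pv_equiv track=rewrite | github.com/subing85/studio-boy | pipe/src/pipe/core/tasks/__init__.py | setParentFilter
-- ===== SOURCE A (Python) =====
-- def setParentFilter(links, projectid):
--     links.reverse()
--     filter = 'Task where %s = "%s" and %s = "%s"' % (
--         "project_id",
--         projectid,
--         "type.name",
--         links[0],
--     )
--     parent = ""
--     for each in links[1:]:
--         parent += "parent."
--         key = "%sname" % parent
--         parent_filter = ' and %s = "%s"' % (key, each)
--         filter += parent_filter
--     return filter
-- ===== SOURCE B (Python) =====
-- def setParentFilter(links, projectid):
--     links.reverse()
--     clauses = []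
--     depth = len(links) - 1
--     for each in links[:0:-1]:  # tail elements, deepest ancestor first
--         clauses.append(' and %s = "%s"' % ("parent." * depth + "name", each))
--         depth -= 1
--     return 'Task where project_id = "%s" and type.name = "%s"' % (projectid, links[0]) \
--         + "".join(reversed(clauses))
-- ===== Notes on version B (the rewrite author's own statement) =====
-- stated objective: alternative
-- what changed: Traverses the tail in the opposite order (deepest ancestor first) with a shrinking depth counter, collecting clauses into a list that is reversed and joined once, instead of A's forward loop with a growing 'parent.' prefix string accumulator.
import Mathlib
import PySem

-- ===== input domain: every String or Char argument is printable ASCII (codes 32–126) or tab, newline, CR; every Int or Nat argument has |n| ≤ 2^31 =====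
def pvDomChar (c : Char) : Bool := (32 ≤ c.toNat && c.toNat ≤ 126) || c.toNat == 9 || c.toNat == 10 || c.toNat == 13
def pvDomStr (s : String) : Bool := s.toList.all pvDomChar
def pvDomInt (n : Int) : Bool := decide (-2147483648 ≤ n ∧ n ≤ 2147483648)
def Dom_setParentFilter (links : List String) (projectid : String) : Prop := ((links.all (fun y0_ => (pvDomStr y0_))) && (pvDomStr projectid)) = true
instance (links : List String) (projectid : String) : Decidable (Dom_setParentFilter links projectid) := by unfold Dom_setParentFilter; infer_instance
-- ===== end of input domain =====

-- B builds the clause suffix back-to-front: it traverses the tail deepest-ancestor-first,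
-- collecting clauses with a depth countdown and joining the reversed list, instead of A's
-- forward loop with a growing "parent." prefix accumulator. Both A and B reverse `links` in place in Python; the
-- equivalence proved here is about the return value.


-- ===== PORT A =====
-- A: reverse, head clause, then a forward fold over the tail carrying (filter, parent) state.
def setParentFilter (links : List String) (projectid : String) : String :=
  let rev := links.reverse
  let filter := "Task where project_id = \"" ++ projectid ++ "\" and type.name = \"" ++ rev.headD "" ++ "\""
  (List.foldl
    (fun (st : String × String) each =>
      let parent := st.2 ++ "parent."
      let key := parent ++ "name"
      let parent_filter := " and " ++ key ++ " = \"" ++ each ++ "\""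
      (st.1 ++ parent_filter, parent))
    (filter, "") (rev.drop 1)).1

-- ===== PORT B =====
-- B: traverse the tail in reverse (deepest first), collect clauses with a depth countdown,
-- then assemble back-to-front by joining the reversed clause list.
def setParentFilter_alt (links : List String) (projectid : String) : String :=
  let rev := links.reverse
  let st := List.foldl
    (fun (st : List String × Nat) each =>
      (st.1 ++ [" and " ++ String.join (List.replicate st.2 "parent.") ++ "name = \"" ++ each ++ "\""],
       st.2 - 1))
    ([], rev.length - 1) ((rev.drop 1).reverse)
  "Task where project_id = \"" ++ projectid ++ "\" and type.name = \"" ++ rev.headD "" ++ "\"" ++ String.join st.1.reverse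

-- ===== PRECONDITION & SPEC =====
-- Pre_ excludes only the empty list, on which Python A raises IndexError at links[0].
def Pre_setParentFilter (links : List String) (projectid : String) : Prop := links ≠ []
instance (links : List String) (projectid : String) : Decidable (Pre_setParentFilter links projectid) := by unfold Pre_setParentFilter; infer_instance
def pvWitness_setParentFilter : List String × String := (["Asset", "Modeling"], "P1")

def Spec_setParentFilter (links : List String) (projectid : String) (out : String) : Prop := out = setParentFilter_alt links projectid
instance (links : List String) (projectid : String) (out : String) : Decidable (Spec_setParentFilter links projectid out) := by unfold Spec_setParentFilter; infer_instance

-- ===== CLAIM (what is proved, stated in full; the proofs are below) =====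
def Claim_equal_setParentFilter : Prop := ∀ (links : List String) (projectid : String), Dom_setParentFilter links projectid → Pre_setParentFilter links projectid → Spec_setParentFilter links projectid (setParentFilter links projectid)

-- ===== LEMMAS AND PROOFS =====

-- String.join is a foldl of ++; the seed moves to the front.
theorem strFoldlAppend (l : List String) : ∀ s : String, List.foldl (· ++ ·) s l = s ++ List.foldl (· ++ ·) "" l := by
  induction l with
  | nil => intro s; simp
  | cons a t ih =>
    intro s
    simp only [List.foldl_cons]
    rw [ih (s ++ a), ih ("" ++ a)]
    simp [String.append_assoc]

theorem join_cons (s : String) (l : List String) : String.join (s :: l) = s ++ String.join l := by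
  simp only [String.join, List.foldl_cons]
  rw [strFoldlAppend l ("" ++ s)]
  simp

-- ("parent." * k) ++ "parent." = "parent." * (k+1)
theorem rep_step (k : Nat) :
    String.join (List.replicate k "parent.") ++ "parent." = String.join (List.replicate (k + 1) "parent.") := by
  induction k with
  | zero => simp [String.join]
  | succ n ih =>
    rw [List.replicate_succ, join_cons, List.replicate_succ (n := n + 1), join_cons,
      String.append_assoc, ih]

-- A's forward loop with parent = "parent." * k and seed f equals f ++ the indexed clauses from k+1.
theorem loopA_eq (xs : List String) : ∀ (k : Nat) (f : String),
    (List.foldl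
      (fun (st : String × String) each =>
        let parent := st.2 ++ "parent."
        let key := parent ++ "name"
        let parent_filter := " and " ++ key ++ " = \"" ++ each ++ "\""
        (st.1 ++ parent_filter, parent))
      (f, String.join (List.replicate k "parent.")) xs).1
    = f ++ String.join ((xs.zipIdx (k + 1)).map
        (fun p => " and " ++ String.join (List.replicate p.2 "parent.") ++ "name = \"" ++ p.1 ++ "\"")) := by
  induction xs with
  | nil => intro k f; simp [String.join]
  | cons x t ih =>
    intro k f
    simp only [List.foldl_cons, List.zipIdx_cons, List.map_cons]
    rw [rep_step k, ih (k + 1), join_cons]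
    simp [String.append_assoc]

-- B's backward loop with starting depth ys.length + k and seed acc collects, in traversal
-- order, the indexed clauses of ys.reverse from k+1 reversed.
theorem loopB_eq (ys : List String) : ∀ (k : Nat) (acc : List String),
    (List.foldl
      (fun (st : List String × Nat) each =>
        (st.1 ++ [" and " ++ String.join (List.replicate st.2 "parent.") ++ "name = \"" ++ each ++ "\""],
         st.2 - 1))
      (acc, ys.length + k) ys).1
    = acc ++ (List.map
        (fun p => " and " ++ String.join (List.replicate p.2 "parent.") ++ "name = \"" ++ p.1 ++ "\"")
        (ys.reverse.zipIdx (k + 1))).reverse := by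
  induction ys with
  | nil => intro k acc; simp
  | cons y t ih =>
    intro k acc
    simp only [List.foldl_cons, List.reverse_cons]
    have hd : t.length + 1 + k - 1 = t.length + k := by omega
    have hs : (y :: t).length + k = t.length + 1 + k := by simp
    have hc : t.length + 1 + k = k + 1 + t.length := by omega
    rw [hs, hd, ih k]
    rw [List.zipIdx_append, List.map_append, List.reverse_append]
    simp only [List.length_reverse, List.zipIdx_cons, List.zipIdx_nil, List.map_cons,
      List.map_nil, hc]
    simp

-- ===== VERDICT (by name: the statement is the Claim_ definition above) =====
theorem setParentFilter_spec : Claim_equal_setParentFilter := by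
  intro links projectid _ _
  show setParentFilter links projectid = setParentFilter_alt links projectid
  unfold setParentFilter setParentFilter_alt
  have h0 : String.join (List.replicate 0 "parent.") = "" := by simp [String.join]
  have hA := loopA_eq (links.reverse.drop 1) 0
      ("Task where project_id = \"" ++ projectid ++ "\" and type.name = \"" ++ links.reverse.headD "" ++ "\"")
  rw [h0] at hA
  have hlen : ((links.reverse.drop 1).reverse).length + 0 = links.reverse.length - 1 := by simp
  have hB := loopB_eq ((links.reverse.drop 1).reverse) 0 []
  rw [hlen, List.reverse_reverse] at hB
  simp only []
  rw [hA, hB]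
  simp
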